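-- pv_equiv track=rewrite | github.com/srikrishnakaashyap/Coding_Practice | BinaryGameExpedia.py | f
-- ===== SOURCE A (Python) =====
-- def f(currString, size, one_group, zero_group, dp):
--     if len(currString) == size:
--         return 1
--
--     if (currString, size) in dp:
--         return dp[(currString, size)]
--
--     if len(currString) > size:
--         return 0
--
--     zeroGroup = f(currString + "0" * zero_group, size, one_group, zero_group, dp)
--     oneGroup = f(currString + "1" * one_group, size, one_group, zero_group, dp)
--
--     dp[(currString, size)] = zeroGroup + oneGroup
--
--     return zeroGroup + oneGroup
-- ===== SOURCE B (Python) =====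
-- def f(currString, size, one_group, zero_group, dp):
--     # Iterative 1-D DP over the remaining length; does not touch dp
--     # (A fills dp as a memo table in place; B leaves it unchanged).
--     rem = size - len(currString)
--     if rem < 0:
--         return 0
--     ways = [0] * (rem + 1)
--     ways[0] = 1
--     for r in range(1, rem + 1):
--         total = 0
--         if 0 < zero_group <= r:
--             total += ways[r - zero_group]
--         if 0 < one_group <= r:
--             total += ways[r - one_group]
--         ways[r] = total
--     return ways[rem]
-- ===== Notes on version B (the rewrite author's own statement) =====
-- stated objective: alternative
-- what changed: Replaced the top-down string-building recursion memoised by a dict of (string,size) keys with a bottom-up 1-D dynamic program over the remaining length (ways[r] = ways[r-zero_group] + ways[r-one_group]); B never reads or writes the dp argument (A mutates dp in place; the claim is about the return value only); …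
-- outside the precondition, e.g. on f('', 2, 1, 1, {('0', 2): 5}): A returns 7, B returns 4; on f('', 1, 1, 0, {}): A raises RecursionError, B returns 1
import Mathlib
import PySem

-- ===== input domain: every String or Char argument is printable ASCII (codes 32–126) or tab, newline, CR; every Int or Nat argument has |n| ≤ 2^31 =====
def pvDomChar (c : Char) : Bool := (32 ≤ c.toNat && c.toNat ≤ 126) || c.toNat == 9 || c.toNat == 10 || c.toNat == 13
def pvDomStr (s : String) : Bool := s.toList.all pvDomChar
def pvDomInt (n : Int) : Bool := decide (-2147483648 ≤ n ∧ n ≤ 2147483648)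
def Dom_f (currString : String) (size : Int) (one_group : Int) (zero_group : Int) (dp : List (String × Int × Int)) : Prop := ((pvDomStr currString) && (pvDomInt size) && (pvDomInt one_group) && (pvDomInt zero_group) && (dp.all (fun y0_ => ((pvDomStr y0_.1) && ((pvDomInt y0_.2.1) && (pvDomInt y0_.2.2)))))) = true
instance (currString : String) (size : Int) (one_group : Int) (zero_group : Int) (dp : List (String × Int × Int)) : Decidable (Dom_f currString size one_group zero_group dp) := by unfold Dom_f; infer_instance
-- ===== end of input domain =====

-- B replaces A's top-down string-building memoised recursion with a bottom-up dynamic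
-- program over the remaining length; A mutates its dp argument in place (B does not) —
-- the claim is about the RETURN value only.

-- ===== PORT A =====
-- Python's dict, keyed by the tuple (currString, size), is ported as a hash map with the
-- same key→value semantics (unique keys, lookup/overwrite/containment); the dict argument
-- (an association list by convention, first key occurrence binding) is loaded once at entry.
def dpInit (dp : List (String × Int × Int)) : Std.HashMap (String × Int) Int :=
  dp.foldl (fun t p => if t.contains (p.1, p.2.1) then t else t.insert (p.1, p.2.1) p.2.2) ∅

-- A's recursion, with the dict threaded through and a fuel guard that only makes the same
-- computation total (never reached under Pre_f: each recursive call grows the string by ≥ 1).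
-- 'currString + "0" * zero_group' is curr ++ List.replicate zero_group.toNat '0' (exact:
-- Python string repetition by a non-positive count is empty, as is replicate of toNat = 0).
def fRec (size one_group zero_group : Int) :
    Nat → List Char → Std.HashMap (String × Int) Int → Int × Std.HashMap (String × Int) Int
  | 0, _, t => (0, t)
  | fuel+1, curr, t =>
    if (curr.length : Int) = size then (1, t)
    else
      match t[(String.ofList curr, size)]? with
      | some v => (v, t)
      | none =>
        if (curr.length : Int) > size then (0, t)
        else
          let zres := fRec size one_group zero_group fuel
            (curr ++ List.replicate zero_group.toNat '0') t
          let ores := fRec size one_group zero_group fuel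
            (curr ++ List.replicate one_group.toNat '1') zres.2
          (zres.1 + ores.1, ores.2.insert (String.ofList curr, size) (zres.1 + ores.1))

def f (currString : String) (size : Int) (one_group : Int) (zero_group : Int)
    (dp : List (String × Int × Int)) : Int :=
  (fRec size one_group zero_group ((size - (currString.toList.length : Int)).toNat + 1)
    currString.toList (dpInit dp)).1

-- ===== PORT B =====
-- Python's integer-indexed list is ported as Array; every index below is guarded
-- non-negative and within bounds, so .toNat indexing and setIfInBounds are exact.
def f_alt (currString : String) (size : Int) (one_group : Int) (zero_group : Int)
    (dp : List (String × Int × Int)) : Int :=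
  let rem := size - PySem.Str.len currString
  if rem < 0 then 0
  else
    let ways0 : Array Int := (Array.replicate (rem + 1).toNat 0).setIfInBounds 0 1
    let ways := (PySem.List.pyRange 1 (rem + 1) 1).foldl
      (fun ways r =>
        let total :=
          (if 0 < zero_group ∧ zero_group ≤ r then ways.getD (r - zero_group).toNat 0 else 0)
          + (if 0 < one_group ∧ one_group ≤ r then ways.getD (r - one_group).toNat 0 else 0)
        ways.setIfInBounds r.toNat total) ways0
    ways.getD rem.toNat 0

-- ===== PRECONDITION & SPEC =====
-- Pre_f excludes (a) inputs where A recurses forever (a non-positive group length with the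
-- string still shorter than size: the string never grows, RecursionError), and (b) dp
-- arguments seeded with an entry whose key A's memo could consult (second component = size,
-- first component extending currString): such seeded memo values override the count in a way
-- that depends on string identity, an artefact of the memo representation that neither
-- behaviour specifies.
def Pre_f (currString : String) (size : Int) (one_group : Int) (zero_group : Int)
    (dp : List (String × Int × Int)) : Prop :=
  (size ≤ PySem.Str.len currString ∨ (1 ≤ zero_group ∧ 1 ≤ one_group)) ∧
  ∀ p ∈ dp, ¬ (p.2.1 = size ∧ currString.toList <+: p.1.toList)
instance (currString : String) (size : Int) (one_group : Int) (zero_group : Int) (dp : List (String × Int × Int)) : Decidable (Pre_f currString size one_group zero_group dp) := by unfold Pre_f; infer_instance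

def pvWitness_f : String × Int × Int × Int × (List (String × Int × Int)) :=
  ("", 4, 1, 2, [])

def Spec_f (currString : String) (size : Int) (one_group : Int) (zero_group : Int) (dp : List (String × Int × Int)) (out : Int) : Prop := out = f_alt currString size one_group zero_group dp
instance (currString : String) (size : Int) (one_group : Int) (zero_group : Int) (dp : List (String × Int × Int)) (out : Int) : Decidable (Spec_f currString size one_group zero_group dp out) := by unfold Spec_f; infer_instance

-- ===== CLAIM (what is proved, stated in full; the proofs are below) =====
def Claim_equal_f : Prop := ∀ (currString : String) (size : Int) (one_group : Int) (zero_group : Int) (dp : List (String × Int × Int)), Dom_f currString size one_group zero_group dp → Pre_f currString size one_group zero_group dp → Spec_f currString size one_group zero_group dp (f currString size one_group zero_group dp)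

-- ===== LEMMAS AND PROOFS =====

-- the mathematical count: G zgp ogp n = number of ways to fill n positions with blocks of
-- (zgp+1) zeros and (ogp+1) ones
def G (zgp ogp : Nat) : Nat → Int
  | 0 => 1
  | (n+1) =>
      (if zgp ≤ n then G zgp ogp (n - zgp) else 0)
      + (if ogp ≤ n then G zgp ogp (n - ogp) else 0)
  termination_by n => n
  decreasing_by all_goals omega

-- G extended to an Int remaining length (negative = overshot = 0 ways)
def V (zgp ogp : Nat) (r : Int) : Int := if r < 0 then 0 else G zgp ogp r.toNat

-- a key found in the loaded dict comes from the association list (or the start map)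
theorem dpInit_lookup (dp : List (String × Int × Int)) (t0 : Std.HashMap (String × Int) Int)
    (s : String) (sz v : Int)
    (h : (dp.foldl (fun t p => if t.contains (p.1, p.2.1) then t
            else t.insert (p.1, p.2.1) p.2.2) t0)[(s, sz)]? = some v) :
    t0[(s, sz)]? = some v ∨ ∃ p ∈ dp, p.1 = s ∧ p.2.1 = sz := by
  induction dp generalizing t0 with
  | nil => exact Or.inl h
  | cons p rest ih =>
    simp only [List.foldl_cons] at h
    rcases ih _ h with h' | ⟨q, hq, hk⟩
    · by_cases hc : t0.contains (p.1, p.2.1)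
      · rw [if_pos hc] at h'
        exact Or.inl h'
      · rw [if_neg hc, Std.HashMap.getElem?_insert] at h'
        by_cases hbe : ((p.1, p.2.1) == (s, sz)) = true
        · have hk := beq_iff_eq.mp hbe
          right
          exact ⟨p, by simp, congrArg Prod.fst hk, congrArg Prod.snd hk⟩
        · rw [if_neg hbe] at h'
          exact Or.inl h'
    · right
      exact ⟨q, by simp [hq], hk⟩

-- the memo invariant: every dict entry whose key A could consult stores the correct count
def MemoInv (base : List Char) (size : Int) (zgp ogp : Nat)
    (t : Std.HashMap (String × Int) Int) : Prop :=
  ∀ (s : String) (sz v : Int), t[(s, sz)]? = some v → sz = size → base <+: s.toList →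
    ((s.toList.length : Int) < size ∧ v = G zgp ogp (size - (s.toList.length : Int)).toNat)
-- unfolding V one block step
theorem V_step (zgp ogp : Nat) (r : Int) (hr : 1 ≤ r) :
    V zgp ogp r = V zgp ogp (r - ((zgp : Int) + 1)) + V zgp ogp (r - ((ogp : Int) + 1)) := by
  obtain ⟨m, hm⟩ : ∃ m : Nat, r = (m : Int) + 1 := ⟨(r - 1).toNat, by omega⟩
  subst hm
  have hL : V zgp ogp ((m : Int) + 1) = G zgp ogp (m + 1) := by
    unfold V
    rw [if_neg (by omega)]
    congr 1
  have hz : V zgp ogp ((m : Int) + 1 - ((zgp : Int) + 1))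
      = if zgp ≤ m then G zgp ogp (m - zgp) else 0 := by
    by_cases h : zgp ≤ m
    · rw [if_pos h]
      unfold V
      rw [if_neg (by omega)]
      congr 1 <;> omega
    · rw [if_neg h]
      unfold V
      rw [if_pos (by omega)]
  have ho : V zgp ogp ((m : Int) + 1 - ((ogp : Int) + 1))
      = if ogp ≤ m then G zgp ogp (m - ogp) else 0 := by
    by_cases h : ogp ≤ m
    · rw [if_pos h]
      unfold V
      rw [if_neg (by omega)]
      congr 1 <;> omega
    · rw [if_neg h]
      unfold V
      rw [if_pos (by omega)]
  rw [hL, hz, ho, G]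

-- A-side main lemma: under the memo invariant and sufficient fuel, fRec returns the count V
-- of the remaining length and preserves the invariant
theorem fRec_correct (size : Int) (zgp ogp : Nat) (base : List Char) :
    ∀ (fuel : Nat) (curr : List Char) (t : Std.HashMap (String × Int) Int),
      base <+: curr →
      MemoInv base size zgp ogp t →
      (size - (curr.length : Int)).toNat < fuel →
      (fRec size ((ogp : Int) + 1) ((zgp : Int) + 1) fuel curr t).1
          = V zgp ogp (size - (curr.length : Int)) ∧
        MemoInv base size zgp ogp (fRec size ((ogp : Int) + 1) ((zgp : Int) + 1) fuel curr t).2 := by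
  intro fuel
  induction fuel with
  | zero => intro curr t _ _ hf; omega
  | succ fuel ih =>
    intro curr t hpre hinv hf
    by_cases heq : (curr.length : Int) = size
    · have hb : fRec size ((ogp : Int) + 1) ((zgp : Int) + 1) (fuel + 1) curr t = (1, t) := by
        simp [fRec, heq]
      rw [hb]
      have hV : V zgp ogp (size - (curr.length : Int)) = 1 := by
        unfold V
        rw [if_neg (by omega)]
        have h0 : (size - (curr.length : Int)).toNat = 0 := by omega
        rw [h0, G]
      exact ⟨by rw [hV], hinv⟩
    · rcases hget : t[(String.ofList curr, size)]? with _ | v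
      · by_cases hgt : (curr.length : Int) > size
        · have hb : fRec size ((ogp : Int) + 1) ((zgp : Int) + 1) (fuel + 1) curr t = (0, t) := by
            simp [fRec, heq, hget, hgt]
          rw [hb]
          have hV : V zgp ogp (size - (curr.length : Int)) = 0 := by
            unfold V
            rw [if_pos (by omega)]
          exact ⟨by rw [hV], hinv⟩
        · -- recursive case: remaining length rem ≥ 1
          have hrem : 1 ≤ size - (curr.length : Int) := by omega
          have hcz : ((zgp : Int) + 1).toNat = zgp + 1 := by omega
          have hco : ((ogp : Int) + 1).toNat = ogp + 1 := by omega
          have hzlen : (curr ++ List.replicate (zgp + 1) '0').length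
              = curr.length + (zgp + 1) := by simp
          have holen : (curr ++ List.replicate (ogp + 1) '1').length
              = curr.length + (ogp + 1) := by simp
          have hz := ih (curr ++ List.replicate (zgp + 1) '0') t
            (hpre.trans (List.prefix_append _ _)) hinv (by rw [hzlen]; omega)
          have ho := ih (curr ++ List.replicate (ogp + 1) '1')
            (fRec size ((ogp : Int) + 1) ((zgp : Int) + 1) fuel
              (curr ++ List.replicate (zgp + 1) '0') t).2
            (hpre.trans (List.prefix_append _ _)) hz.2 (by rw [holen]; omega)
          have hvz : V zgp ogp (size - ((curr ++ List.replicate (zgp + 1) '0').length : Int))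
              = V zgp ogp (size - (curr.length : Int) - ((zgp : Int) + 1)) := by
            rw [hzlen]; congr 1 <;> (push_cast; ring)
          have hvo : V zgp ogp (size - ((curr ++ List.replicate (ogp + 1) '1').length : Int))
              = V zgp ogp (size - (curr.length : Int) - ((ogp : Int) + 1)) := by
            rw [holen]; congr 1 <;> (push_cast; ring)
          simp only [fRec, if_neg heq, hget, if_neg hgt, hcz, hco]
          constructor
          · rw [hz.1, ho.1, hvz, hvo, V_step zgp ogp _ hrem]
          · intro s sz v hv hsz hpref
            rw [Std.HashMap.getElem?_insert] at hv
            by_cases hbe : ((String.ofList curr, size) == (s, sz)) = true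
            · have hk := beq_iff_eq.mp hbe
              have hs : s = String.ofList curr := (congrArg Prod.fst hk).symm
              have hsl : s.toList = curr := by rw [hs]; simp
              rw [if_pos hbe] at hv
              have hvv := Option.some.inj hv
              refine ⟨by rw [hsl]; omega, ?_⟩
              rw [← hvv, hz.1, ho.1, hvz, hvo, ← V_step zgp ogp _ hrem, hsl]
              have hne : ¬ (size - (curr.length : Int) < 0) := by omega
              unfold V
              rw [if_neg hne]
            · rw [if_neg hbe] at hv
              exact ho.2 s sz v hv hsz hpref
      · -- memo hit
        have hb : fRec size ((ogp : Int) + 1) ((zgp : Int) + 1) (fuel + 1) curr t = (v, t) := by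
          simp [fRec, heq, hget]
        rw [hb]
        have hI := hinv (String.ofList curr) size v hget rfl (by simpa using hpre)
        simp only [String.toList_ofList] at hI
        refine ⟨?_, hinv⟩
        rw [hI.2]
        unfold V
        rw [if_neg (by omega)]

-- B-side: the DP array built by the fold holds G at every filled index
theorem loop_invariant (zgp ogp : Nat) (remN : Nat) :
    ∀ k : Nat, k ≤ remN →
      ((PySem.List.pyRange 1 (((k : Nat) : Int) + 1) 1).foldl
        (fun ways r =>
          let total :=
            (if 0 < (zgp : Int) + 1 ∧ (zgp : Int) + 1 ≤ r then ways.getD (r - ((zgp : Int) + 1)).toNat 0 else 0)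
            + (if 0 < (ogp : Int) + 1 ∧ (ogp : Int) + 1 ≤ r then ways.getD (r - ((ogp : Int) + 1)).toNat 0 else 0)
          ways.setIfInBounds r.toNat total)
        ((Array.replicate (remN + 1) (0 : Int)).setIfInBounds 0 1)).size = remN + 1 ∧
      ∀ i : Nat, i ≤ k →
        ((PySem.List.pyRange 1 (((k : Nat) : Int) + 1) 1).foldl
          (fun ways r =>
            let total :=
              (if 0 < (zgp : Int) + 1 ∧ (zgp : Int) + 1 ≤ r then ways.getD (r - ((zgp : Int) + 1)).toNat 0 else 0)
              + (if 0 < (ogp : Int) + 1 ∧ (ogp : Int) + 1 ≤ r then ways.getD (r - ((ogp : Int) + 1)).toNat 0 else 0)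
            ways.setIfInBounds r.toNat total)
          ((Array.replicate (remN + 1) (0 : Int)).setIfInBounds 0 1)).getD i 0 = G zgp ogp i := by
  intro k
  induction k with
  | zero =>
    intro _
    have hrange : PySem.List.pyRange 1 (((0 : Nat) : Int) + 1) 1 = [] :=
      PySem.List.pyRange_one_eq_nil (by norm_num)
    rw [hrange]
    simp only [List.foldl_nil]
    refine ⟨by simp, ?_⟩
    intro i hi
    interval_cases i
    rw [G]
    simp [Array.getD_eq_getD_getElem?, Array.getElem?_setIfInBounds]
  | succ k ihk =>
    intro hk
    have ih := ihk (by omega)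
    have hc : (((k + 1 : Nat)) : Int) + 1 = (((k : Nat)) : Int) + 1 + 1 := by push_cast; ring
    have hsplit : PySem.List.pyRange 1 (((k + 1 : Nat) : Int) + 1) 1
        = PySem.List.pyRange 1 (((k : Nat) : Int) + 1) 1 ++ [((k : Nat) : Int) + 1] := by
      rw [hc]
      exact PySem.List.pyRange_one_succ_right (by omega)
    rw [hsplit, List.foldl_append]
    set w := (PySem.List.pyRange 1 (((k : Nat) : Int) + 1) 1).foldl
      (fun ways r =>
        let total :=
          (if 0 < (zgp : Int) + 1 ∧ (zgp : Int) + 1 ≤ r then ways.getD (r - ((zgp : Int) + 1)).toNat 0 else 0)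
          + (if 0 < (ogp : Int) + 1 ∧ (ogp : Int) + 1 ≤ r then ways.getD (r - ((ogp : Int) + 1)).toNat 0 else 0)
        ways.setIfInBounds r.toNat total)
      ((Array.replicate (remN + 1) (0 : Int)).setIfInBounds 0 1) with hw
    obtain ⟨hlen, hvals⟩ := ih
    simp only [List.foldl_cons, List.foldl_nil]
    -- the value written at index k+1 is G (k+1)
    have htot :
        ((if 0 < (zgp : Int) + 1 ∧ (zgp : Int) + 1 ≤ ((k : Nat) : Int) + 1 then w.getD (((k : Nat) : Int) + 1 - ((zgp : Int) + 1)).toNat 0 else 0)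
         + (if 0 < (ogp : Int) + 1 ∧ (ogp : Int) + 1 ≤ ((k : Nat) : Int) + 1 then w.getD (((k : Nat) : Int) + 1 - ((ogp : Int) + 1)).toNat 0 else 0))
        = G zgp ogp (k + 1) := by
      rw [G]
      congr 1
      · by_cases h : zgp ≤ k
        · rw [if_pos (by omega : 0 < (zgp : Int) + 1 ∧ (zgp : Int) + 1 ≤ ((k : Nat) : Int) + 1), if_pos h]
          have hidx : (((k : Nat) : Int) + 1 - ((zgp : Int) + 1)).toNat = k - zgp := by omega
          rw [hidx]
          exact hvals (k - zgp) (by omega)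
        · rw [if_neg (by omega), if_neg h]
      · by_cases h : ogp ≤ k
        · rw [if_pos (by omega : 0 < (ogp : Int) + 1 ∧ (ogp : Int) + 1 ≤ ((k : Nat) : Int) + 1), if_pos h]
          have hidx : (((k : Nat) : Int) + 1 - ((ogp : Int) + 1)).toNat = k - ogp := by omega
          rw [hidx]
          exact hvals (k - ogp) (by omega)
        · rw [if_neg (by omega), if_neg h]
    have htn : ((((k : Nat)) : Int) + 1).toNat = k + 1 := by omega
    constructor
    · show ((w.setIfInBounds ((((k : Nat)) : Int) + 1).toNat _)).size = remN + 1
      rw [htn, Array.size_setIfInBounds, hlen]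
    · intro i hi
      show ((w.setIfInBounds ((((k : Nat)) : Int) + 1).toNat _)).getD i 0 = G zgp ogp i
      rw [htot, htn, Array.getD_eq_getD_getElem?, Array.getElem?_setIfInBounds]
      by_cases hik : i = k + 1
      · subst hik
        rw [if_pos rfl, if_pos (by omega : k + 1 < w.size)]
        rfl
      · rw [if_neg (by omega)]
        rw [← Array.getD_eq_getD_getElem?]
        exact hvals i (by omega)

-- B computes V
theorem f_alt_eq_V (currString : String) (size : Int) (zgp ogp : Nat)
    (dp : List (String × Int × Int)) :
    f_alt currString size ((ogp : Int) + 1) ((zgp : Int) + 1) dp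
      = V zgp ogp (size - (currString.toList.length : Int)) := by
  unfold f_alt
  have hlen : PySem.Str.len currString = (currString.toList.length : Int) := by
    simp [String.length_toList]
  rw [hlen]
  by_cases hneg : size - (currString.toList.length : Int) < 0
  · rw [if_pos hneg]
    unfold V
    rw [if_pos hneg]
  · rw [if_neg hneg]
    obtain ⟨remN, hN⟩ : ∃ n : Nat, size - (currString.toList.length : Int) = (n : Int) :=
      ⟨(size - (currString.toList.length : Int)).toNat, by omega⟩
    rw [hN]
    have hrep : (((remN : Nat) : Int) + 1).toNat = remN + 1 := by omega
    rw [hrep]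
    obtain ⟨_, hvals⟩ := loop_invariant zgp ogp remN remN (le_refl _)
    have htn : ((remN : Nat) : Int).toNat = remN := by omega
    rw [htn, hvals remN (le_refl _)]
    unfold V
    rw [if_neg (by omega), Int.toNat_natCast]

-- the top-level dict lookup misses under Pre_f
theorem dpInit_none_of_pre (currString : String) (size : Int) (dp : List (String × Int × Int))
    (h : ∀ p ∈ dp, ¬ (p.2.1 = size ∧ currString.toList <+: p.1.toList)) :
    (dpInit dp)[(currString, size)]? = none := by
  rcases hv : (dpInit dp)[(currString, size)]? with _ | v
  · rfl
  · exfalso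
    rcases dpInit_lookup dp ∅ _ _ _ hv with h0 | ⟨p, hp, h1, h2⟩
    · simp at h0
    · exact h p hp ⟨h2, by rw [h1]⟩

-- ===== VERDICT (by name: the statement is the Claim_ definition above) =====
theorem f_spec : Claim_equal_f := by
  intro currString size one_group zero_group dp _ hpre
  unfold Spec_f f
  rcases hpre with ⟨hterm, hdp⟩
  have hlen : PySem.Str.len currString = (currString.toList.length : Int) := by
    simp [String.length_toList]
  rcases hterm with hbig | ⟨hzg, hog⟩
  · -- size ≤ len(currString): A returns directly (1 if equal, else a dict miss then 0)
    rw [hlen] at hbig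
    have hfuel : (size - (currString.toList.length : Int)).toNat + 1 = 1 := by omega
    rw [hfuel]
    by_cases heq : (currString.toList.length : Int) = size
    · have heq' : (currString.length : Int) = size := by
        rw [← String.length_toList]; exact heq
      have hb : fRec size one_group zero_group 1 currString.toList (dpInit dp) = (1, dpInit dp) := by
        simp [fRec, heq']
      rw [hb]
      unfold f_alt
      rw [hlen, if_neg (by omega)]
      have h0 : size - (currString.toList.length : Int) = ((0 : Nat) : Int) := by omega
      rw [h0]
      have h1 : (((0 : Nat) : Int) + 1).toNat = 1 := by norm_num
      rw [h1]
      have hr : PySem.List.pyRange 1 (((0 : Nat) : Int) + 1) 1 = [] :=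
        PySem.List.pyRange_one_eq_nil (by norm_num)
      rw [hr]
      simp only [List.foldl_nil]
      simp [Array.getD_eq_getD_getElem?, Array.getElem?_setIfInBounds]
    · have hgt' : size < (currString.length : Int) := by
        rw [← String.length_toList]; omega
      have hne' : ¬ (currString.length : Int) = size := by omega
      have hb : fRec size one_group zero_group 1 currString.toList (dpInit dp) = (0, dpInit dp) := by
        simp [fRec, hne', dpInit_none_of_pre currString size dp hdp, hgt']
      rw [hb]
      unfold f_alt
      rw [hlen, if_pos (by omega)]
  · -- recursive case: both groups positive
    obtain ⟨zgp, hzgp⟩ : ∃ n : Nat, zero_group = (n : Int) + 1 := ⟨(zero_group - 1).toNat, by omega⟩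
    obtain ⟨ogp, hogp⟩ : ∃ n : Nat, one_group = (n : Int) + 1 := ⟨(one_group - 1).toNat, by omega⟩
    subst hzgp hogp
    have hinv : MemoInv currString.toList size zgp ogp (dpInit dp) := by
      intro s sz v hv hsz hpref
      rcases dpInit_lookup dp ∅ s sz v hv with h0 | ⟨p, hp, h1, h2⟩
      · simp at h0
      · exact absurd ⟨h2.trans hsz, h1 ▸ hpref⟩ (hdp p hp)
    have := fRec_correct size zgp ogp currString.toList
      ((size - (currString.toList.length : Int)).toNat + 1) currString.toList (dpInit dp)
      (List.prefix_refl _) hinv (by omega)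
    rw [this.1, f_alt_eq_V]

-- pvWitness_f satisfies Dom_f ∧ Pre_f
theorem pvWitness_f_ok :
    Dom_f pvWitness_f.1 pvWitness_f.2.1 pvWitness_f.2.2.1 pvWitness_f.2.2.2.1 pvWitness_f.2.2.2.2 ∧
    Pre_f pvWitness_f.1 pvWitness_f.2.1 pvWitness_f.2.2.1 pvWitness_f.2.2.2.1 pvWitness_f.2.2.2.2 := by
  constructor
  · decide
  · unfold pvWitness_f Pre_f
    simp
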